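-- pv_equiv track=rewrite | github.com/yowatanabe/learn-to-code | python/373/main.py | max_jobs
-- ===== SOURCE A (Python) =====
-- from typing import List
-- import heapq
--
-- def max_jobs(jobs: List[List[int]]) -> int:
--     jobs.sort(key=lambda x: x[1])  # deadline でソート
--
--     time = 0
--     max_heap = []  # duration を -duration で保持（最大ヒープ相当）
--
--     for duration, deadline in jobs:
--         time += duration
--         heapq.heappush(max_heap, -duration)
--
--         if time > deadline:
--             # 最も時間がかかるジョブを捨てる
--             longest = -heapq.heappop(max_heap)
--             time -= longest
--
--     return len(max_heap)
-- ===== SOURCE B (Python) =====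
-- from typing import List
--
-- def max_jobs(jobs: List[List[int]]) -> int:
--     jobs.sort(key=lambda x: x[1])  # same in-place deadline sort as A
--
--     time = 0
--     durations = []  # accepted job durations, plain list
--
--     for duration, deadline in jobs:
--         durations.append(duration)
--         time += duration
--
--         if time > deadline:
--             # drop the longest accepted job, found by linear scan
--             longest = max(durations)
--             durations.remove(longest)
--             time -= longest
--
--     return len(durations)
-- ===== Notes on version B (the rewrite author's own statement) =====
-- stated objective: simpler
-- what changed: Replaces the heapq max-heap (push + pop of negated durations) by a plain list of accepted durations with a linear max-scan and remove when the running time exceeds a deadline; same in-place deadline sort.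
import Mathlib
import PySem

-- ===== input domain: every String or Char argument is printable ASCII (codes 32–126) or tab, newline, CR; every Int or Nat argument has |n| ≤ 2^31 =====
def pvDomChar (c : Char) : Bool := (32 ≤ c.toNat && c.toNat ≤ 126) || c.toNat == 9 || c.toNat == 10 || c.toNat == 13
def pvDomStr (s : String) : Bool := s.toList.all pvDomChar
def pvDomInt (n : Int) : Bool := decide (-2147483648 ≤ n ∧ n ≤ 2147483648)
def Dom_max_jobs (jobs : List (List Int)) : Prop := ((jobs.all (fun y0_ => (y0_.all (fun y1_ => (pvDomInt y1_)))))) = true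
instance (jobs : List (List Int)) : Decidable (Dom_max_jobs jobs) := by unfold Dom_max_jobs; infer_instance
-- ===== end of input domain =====

-- B replaces A's heapq max-heap of negated durations by a plain list of accepted durations with a
-- linear max-scan and remove (objective: simpler). Both versions sort the argument in place by
-- deadline; the equivalence proved here is about the RETURN value (the in-place sort side effect
-- is identical in A and B).

-- ===== PORT A =====
-- port of heapq._siftdown(heap, 0, pos) with the held-aside newitem already known
-- (CPython writes heap[pos] = newitem before a pop's sift; the write is subsumed by the
-- final `set` here because _siftdown never reads index pos).
def hpSiftdown (heap : List Int) (pos : Nat) (newitem : Int) : List Int :=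
  if _h : 0 < pos then
    let parentpos := (pos - 1) / 2
    let parent := heap.getD parentpos 0
    if newitem < parent then
      hpSiftdown (heap.set pos parent) parentpos newitem
    else heap.set pos newitem
  else heap.set pos newitem
termination_by pos
decreasing_by omega

-- the child CPython's _siftup moves up: the right child if it is in range and not greater
def hpChild (heap : List Int) (pos : Nat) : Nat :=
  if (2 * pos + 1) + 1 < heap.length ∧ ¬ heap.getD (2 * pos + 1) 0 < heap.getD ((2 * pos + 1) + 1) 0
  then (2 * pos + 1) + 1 else 2 * pos + 1

theorem hpChild_lt (heap : List Int) (pos : Nat) (_h : 2 * pos + 1 < heap.length) :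
    pos < hpChild heap pos ∧ hpChild heap pos < heap.length := by
  unfold hpChild; split <;> omega

-- port of heapq._siftup(heap, 0): bubble the hole down to a leaf along smaller children,
-- then sift the held-aside newitem back up
def hpSiftup (heap : List Int) (pos : Nat) (newitem : Int) : List Int :=
  if _hc : 2 * pos + 1 < heap.length then
    hpSiftup (heap.set pos (heap.getD (hpChild heap pos) 0)) (hpChild heap pos) newitem
  else hpSiftdown heap pos newitem
termination_by heap.length - pos
decreasing_by
  have := hpChild_lt heap pos _hc
  simp only [List.length_set]
  omega

-- heapq.heappush(heap, item)
def hpPush (heap : List Int) (item : Int) : List Int :=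
  hpSiftdown (heap ++ [item]) heap.length item

-- heapq.heappop(heap); Python raises IndexError on an empty heap — never reached by max_jobs
def hpPop (heap : List Int) : Int × List Int :=
  match heap.getLast? with
  | none => (0, [])
  | some last =>
    let rest := heap.dropLast
    if rest.isEmpty then (last, [])
    else (rest.getD 0 0, hpSiftup (rest.set 0 last) 0 last)

def max_jobs (jobs : List (List Int)) : Int :=
  let sjobs := PySem.List.sorted jobs (fun x => x.getD 1 0)
  let fin := sjobs.foldl (fun (st : Int × List Int) job =>
    let duration := job.getD 0 0
    let deadline := job.getD 1 0
    let time := st.1 + duration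
    let heap := hpPush st.2 (-duration)
    if deadline < time then
      let p := hpPop heap
      (time - (- p.1), p.2)
    else (time, heap)) (0, [])
  (fin.2.length : Int)

-- ===== PORT B =====
def max_jobs_alt (jobs : List (List Int)) : Int :=
  let sjobs := PySem.List.sorted jobs (fun x => x.getD 1 0)
  let fin := sjobs.foldl (fun (st : Int × List Int) job =>
    let duration := job.getD 0 0
    let deadline := job.getD 1 0
    let durations := st.2 ++ [duration]
    let time := st.1 + duration
    if deadline < time then
      -- max() on a nonempty list and list.remove of a present element never fail here
      let longest := (PySem.List.max? durations (fun y => y)).getD 0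
      (time - longest, (PySem.List.remove? durations longest).getD durations)
    else (time, durations)) (0, [])
  (fin.2.length : Int)

-- ===== PRECONDITION & SPEC =====
-- Python A raises unless every job is a 2-element [duration, deadline] pair: the sort key x[1]
-- raises IndexError on shorter lists and the loop's tuple unpacking raises ValueError otherwise.
def Pre_max_jobs (jobs : List (List Int)) : Prop := ∀ job ∈ jobs, job.length = 2
instance (jobs : List (List Int)) : Decidable (Pre_max_jobs jobs) := by unfold Pre_max_jobs; infer_instance
def pvWitness_max_jobs : List (List Int) := [[2, 2], [1, 1]]

def Spec_max_jobs (jobs : List (List Int)) (out : Int) : Prop := out = max_jobs_alt jobs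
instance (jobs : List (List Int)) (out : Int) : Decidable (Spec_max_jobs jobs out) := by unfold Spec_max_jobs; infer_instance

-- ===== CLAIM (what is proved, stated in full; the proofs are below) =====
def Claim_equal_max_jobs : Prop := ∀ (jobs : List (List Int)), Dom_max_jobs jobs → Pre_max_jobs jobs → Spec_max_jobs jobs (max_jobs jobs)

-- ===== LEMMAS AND PROOFS =====

-- binary-heap property: every non-root entry is at least its parent
def HeapProp (h : List Int) : Prop :=
  ∀ j, 0 < j → j < h.length → h.getD ((j - 1) / 2) 0 ≤ h.getD j 0

theorem getD_set_self {l : List Int} {i : Nat} {v : Int} (hi : i < l.length) :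
    (l.set i v).getD i 0 = v := by
  simp [List.getD_eq_getElem?_getD, hi]

theorem getD_set_ne {l : List Int} {i j : Nat} {v : Int} (hij : i ≠ j) :
    (l.set i v).getD j 0 = l.getD j 0 := by
  simp [List.getD_eq_getElem?_getD, List.getElem?_set_ne hij]

theorem set_perm (l : List Int) (i : Nat) (v : Int) (h : i < l.length) :
    (l.set i v).Perm (v :: (l.take i ++ l.drop (i+1))) := by
  rw [List.set_eq_take_cons_drop v h]; exact List.perm_middle

theorem self_perm (l : List Int) (i : Nat) (h : i < l.length) :
    l.Perm (l.getD i 0 :: (l.take i ++ l.drop (i+1))) := by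
  have h2 := set_perm l i (l.getD i 0) h
  rw [List.getD_eq_getElem l 0 h, List.set_getElem_self] at h2
  rw [List.getD_eq_getElem l 0 h]
  exact h2

theorem set_set_perm (l : List Int) (i j : Nat) (v : Int)
    (hi : i < l.length) (hj : j < l.length) (hij : i ≠ j) :
    ((l.set i (l.getD j 0)).set j v).Perm (l.set i v) := by
  induction l generalizing i j with
  | nil => simp at hi
  | cons a t ih =>
    match i, j with
    | 0, 0 => exact absurd rfl hij
    | 0, m+1 =>
      simp only [List.getD_cons_succ, List.set_cons_zero, List.set_cons_succ]
      have hm : m < t.length := by simpa using hj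
      refine ((set_perm t m v hm).cons _).trans (.trans (.swap _ _ _) ?_)
      exact ((self_perm t m hm).symm).cons _
    | n+1, 0 =>
      simp only [List.getD_cons_zero, List.set_cons_succ, List.set_cons_zero]
      have hn : n < t.length := by simpa using hi
      refine ((set_perm t n a hn).cons _).trans (.trans (.swap _ _ _) ?_)
      exact ((set_perm t n v hn).symm).cons _
    | n+1, m+1 =>
      simp only [List.getD_cons_succ, List.set_cons_succ]
      exact (ih n m (by simpa using hi) (by simpa using hj) (by omega)).cons _

theorem heapProp_root_le (h : List Int) (hp : HeapProp h) :
    ∀ j, j < h.length → h.getD 0 0 ≤ h.getD j 0 := by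
  intro j
  induction j using Nat.strong_induction_on with
  | _ j ih =>
    intro hj
    rcases Nat.eq_zero_or_pos j with h0 | h0
    · subst h0; exact le_refl _
    · exact le_trans (ih ((j-1)/2) (by omega) (by omega)) (hp j h0 hj)

theorem hpSiftdown_perm (heap : List Int) (pos : Nat) (item : Int) (hpos : pos < heap.length) :
    (hpSiftdown heap pos item).Perm (heap.set pos item) := by
  revert hpos
  induction heap, pos using hpSiftdown.induct (newitem := item) with
  | case1 heap pos h pp par hlt ih =>
    intro hpos
    rw [hpSiftdown]
    simp only [dif_pos h]
    have hlt' : item < heap.getD ((pos - 1) / 2) 0 := hlt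
    rw [if_pos hlt']
    refine (ih ?_).trans ?_
    · simp only [List.length_set]; omega
    · exact set_set_perm heap pos ((pos-1)/2) item hpos (by omega) (by omega)
  | case2 heap pos h pp par hlt =>
    intro hpos
    rw [hpSiftdown]
    simp only [dif_pos h]
    have hlt' : ¬ item < heap.getD ((pos - 1) / 2) 0 := hlt
    rw [if_neg hlt']
  | case3 heap pos h =>
    intro hpos
    rw [hpSiftdown]
    simp only [dif_neg h]
    exact List.Perm.refl _

theorem hpSiftdown_heapProp (heap : List Int) (pos : Nat) (item : Int) (hpos : pos < heap.length)
    (h1 : ∀ j, 0 < j → j < heap.length → j ≠ pos → (j - 1) / 2 ≠ pos →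
      heap.getD ((j - 1) / 2) 0 ≤ heap.getD j 0)
    (h2 : ∀ j, 0 < j → j < heap.length → (j - 1) / 2 = pos → item ≤ heap.getD j 0)
    (h3 : 0 < pos → ∀ j, 0 < j → j < heap.length → (j - 1) / 2 = pos →
      heap.getD ((pos - 1) / 2) 0 ≤ heap.getD j 0) :
    HeapProp (hpSiftdown heap pos item) := by
  revert hpos h1 h2 h3
  induction heap, pos using hpSiftdown.induct (newitem := item) with
  | case1 heap pos h pp par hlt ih =>
    intro hpos h1 h2 h3
    have hlt' : item < heap.getD ((pos - 1) / 2) 0 := hlt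
    rw [hpSiftdown]
    simp only [dif_pos h]
    rw [if_pos hlt']
    have hq : (pos - 1) / 2 < pos := by omega
    refine ih ?_ ?_ ?_ ?_ <;> simp only [List.length_set]
    · omega
    · -- new h1
      intro j hj hjl hjq hpq
      by_cases hjp : j = pos
      · exact absurd (by omega) hpq
      · rw [getD_set_ne (by omega : pos ≠ j)]
        by_cases hpp : (j - 1) / 2 = pos
        · rw [hpp, getD_set_self hpos]
          exact h3 h j hj hjl hpp
        · rw [getD_set_ne (by omega : pos ≠ (j-1)/2)]
          exact h1 j hj hjl hjp hpp
    · -- new h2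
      intro j hj hjl hjq
      by_cases hjp : j = pos
      · rw [hjp, getD_set_self hpos]
        exact le_of_lt hlt'
      · rw [getD_set_ne (by omega : pos ≠ j)]
        have := h1 j hj hjl hjp (by omega)
        rw [hjq] at this
        exact le_trans (le_of_lt hlt') this
    · -- new h3
      intro hq0 j hj hjl hjq
      have hgq : ((pos - 1) / 2 - 1) / 2 ≠ pos := by omega
      rw [getD_set_ne (by omega : pos ≠ ((pos - 1) / 2 - 1) / 2)]
      have hqle : heap.getD (((pos - 1) / 2 - 1) / 2) 0 ≤ heap.getD ((pos - 1) / 2) 0 :=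
        h1 ((pos - 1) / 2) hq0 (by omega) (by omega) (by omega)
      by_cases hjp : j = pos
      · rw [hjp, getD_set_self hpos]
        exact hqle
      · rw [getD_set_ne (by omega : pos ≠ j)]
        have := h1 j hj hjl hjp (by omega)
        rw [hjq] at this
        exact le_trans hqle this
  | case2 heap pos h pp par hlt =>
    intro hpos h1 h2 h3
    have hlt' : ¬ item < heap.getD ((pos - 1) / 2) 0 := hlt
    rw [hpSiftdown]
    simp only [dif_pos h]
    rw [if_neg hlt']
    intro j hj hjl
    simp only [List.length_set] at hjl
    by_cases hjp : j = pos
    · rw [hjp, getD_set_self hpos, getD_set_ne (by omega : pos ≠ (pos-1)/2)]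
      omega
    · rw [getD_set_ne (by omega : pos ≠ j)]
      by_cases hpp : (j - 1) / 2 = pos
      · rw [hpp, getD_set_self hpos]
        exact h2 j hj hjl hpp
      · rw [getD_set_ne (by omega : pos ≠ (j-1)/2)]
        exact h1 j hj hjl hjp hpp
  | case3 heap pos h =>
    intro hpos h1 h2 h3
    have hp0 : pos = 0 := by omega
    subst hp0
    rw [hpSiftdown]
    simp only [dif_neg h]
    intro j hj hjl
    simp only [List.length_set] at hjl
    by_cases hpp : (j - 1) / 2 = 0
    · rw [hpp, getD_set_self hpos, getD_set_ne (by omega : (0:Nat) ≠ j)]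
      exact h2 j hj hjl hpp
    · rw [getD_set_ne (by omega : (0:Nat) ≠ j), getD_set_ne (by omega : (0:Nat) ≠ (j-1)/2)]
      exact h1 j hj hjl (by omega) hpp

theorem hpSiftup_spec (heap : List Int) (pos : Nat) (item : Int) (hpos : pos < heap.length)
    (h1 : ∀ j, 0 < j → j < heap.length → j ≠ pos → (j - 1) / 2 ≠ pos →
      heap.getD ((j - 1) / 2) 0 ≤ heap.getD j 0)
    (h3 : 0 < pos → ∀ j, 0 < j → j < heap.length → (j - 1) / 2 = pos →
      heap.getD ((pos - 1) / 2) 0 ≤ heap.getD j 0) :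
    HeapProp (hpSiftup heap pos item) ∧ (hpSiftup heap pos item).Perm (heap.set pos item) := by
  revert hpos h1 h3
  induction heap, pos using hpSiftup.induct with
  | case1 heap pos h ih =>
    intro hpos h1 h3
    obtain ⟨hcl, hcu⟩ := hpChild_lt heap pos h
    have hcp : (hpChild heap pos - 1) / 2 = pos := by
      unfold hpChild; split <;> omega
    have hmin : ∀ j, 0 < j → j < heap.length → (j - 1) / 2 = pos →
        heap.getD (hpChild heap pos) 0 ≤ heap.getD j 0 := by
      unfold hpChild
      by_cases hsp : (2*pos+1)+1 < heap.length ∧ ¬ heap.getD (2*pos+1) 0 < heap.getD ((2*pos+1)+1) 0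
      · rw [if_pos hsp]
        intro j hj hjl hjp
        rcases (by omega : j = 2*pos+1 ∨ j = 2*pos+2) with hje | hje <;> subst hje
        · exact le_of_not_gt hsp.2
        · exact le_refl _
      · rw [if_neg hsp]
        intro j hj hjl hjp
        rcases (by omega : j = 2*pos+1 ∨ j = 2*pos+2) with hje | hje <;> subst hje
        · exact le_refl _
        · rcases not_and_or.mp hsp with hx | hx
          · omega
          · exact le_of_lt (not_not.mp hx)
    rw [hpSiftup]
    simp only [dif_pos h]
    have hres := ih ?_ ?_ ?_
    · refine ⟨hres.1, hres.2.trans ?_⟩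
      exact set_set_perm heap pos (hpChild heap pos) item hpos hcu (by omega)
    · simp only [List.length_set]; exact hcu
    · -- h1 for the new hole
      simp only [List.length_set]
      intro j hj hjl hjc hjpc
      by_cases hjp : j = pos
      · subst hjp
        have hj0 : 0 < j := hj
        rw [getD_set_self hpos]
        rw [getD_set_ne (by omega : j ≠ (j-1)/2)]
        exact le_trans (h3 (by omega) (hpChild heap j) (by omega) hcu hcp)
          (le_refl _)
      · rw [getD_set_ne (by omega : pos ≠ j)]
        by_cases hpp : (j - 1) / 2 = pos
        · rw [hpp, getD_set_self hpos]
          exact hmin j hj hjl hpp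
        · rw [getD_set_ne (by omega : pos ≠ (j-1)/2)]
          exact h1 j hj hjl hjp hpp
    · -- h3 for the new hole
      simp only [List.length_set]
      intro hc0 j hj hjl hjc
      rw [hcp, getD_set_self hpos]
      have hjp : j ≠ pos := by omega
      rw [getD_set_ne (by omega : pos ≠ j)]
      have := h1 j hj hjl hjp (by omega)
      rw [hjc] at this
      exact this
  | case2 heap pos h =>
    intro hpos h1 h3
    rw [hpSiftup]
    simp only [dif_neg h]
    refine ⟨hpSiftdown_heapProp heap pos item hpos h1 ?_ h3, hpSiftdown_perm heap pos item hpos⟩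
    intro j hj hjl hjp
    omega

theorem getD_append_left {l₁ l₂ : List Int} {i : Nat} (h : i < l₁.length) :
    (l₁ ++ l₂).getD i 0 = l₁.getD i 0 := by
  simp [List.getD_eq_getElem?_getD, List.getElem?_append_left h]

theorem hpPush_spec (heap : List Int) (item : Int) (hp : HeapProp heap) :
    HeapProp (hpPush heap item) ∧ (hpPush heap item).Perm (item :: heap) := by
  have hpos : heap.length < (heap ++ [item]).length := by simp
  constructor
  · refine hpSiftdown_heapProp (heap ++ [item]) heap.length item hpos ?_ ?_ ?_
    · intro j hj hjl hjp hpp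
      simp only [List.length_append, List.length_cons, List.length_nil] at hjl
      have hjlt : j < heap.length := by omega
      rw [getD_append_left hjlt, getD_append_left (by omega)]
      exact hp j hj hjlt
    · intro j hj hjl hjp
      simp only [List.length_append, List.length_cons, List.length_nil] at hjl
      omega
    · intro hq j hj hjl hjp
      simp only [List.length_append, List.length_cons, List.length_nil] at hjl
      omega
  · refine (hpSiftdown_perm (heap ++ [item]) heap.length item hpos).trans ?_
    have hset : (heap ++ [item]).set heap.length item = heap ++ [item] := by
      rw [List.set_append_right _ _ (le_refl _)]
      simp
    rw [hset]
    exact List.perm_append_singleton item heap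

theorem hpPop_spec (heap : List Int) (hp : HeapProp heap) (hne : heap ≠ []) :
    (hpPop heap).1 = heap.getD 0 0 ∧ HeapProp (hpPop heap).2 ∧
      (hpPop heap).2.Perm (heap.erase (heap.getD 0 0)) := by
  obtain ⟨rest, last, hrl⟩ : ∃ rest last, heap = rest ++ [last] := by
    refine ⟨heap.dropLast, heap.getLast hne, ?_⟩
    exact (List.dropLast_append_getLast hne).symm
  subst hrl
  match rest with
  | [] =>
    simp only [List.nil_append]
    unfold hpPop
    simp [HeapProp]
  | r0 :: rt =>
    have hpop : hpPop ((r0 :: rt) ++ [last]) =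
        ((r0 :: rt).getD 0 0, hpSiftup ((r0 :: rt).set 0 last) 0 last) := by
      unfold hpPop
      rw [List.getLast?_concat, List.dropLast_concat]
      rfl
    rw [hpop]
    have hlen0 : (0:Nat) < ((r0 :: rt).set 0 last).length := by simp
    have hsp := hpSiftup_spec ((r0 :: rt).set 0 last) 0 last hlen0 ?_ ?_
    · refine ⟨(getD_append_left (l₁ := r0 :: rt) (l₂ := [last]) (Nat.succ_pos rt.length)).symm, hsp.1, ?_⟩
      refine (hsp.2.trans ?_)
      rw [List.set_set]
      have h1 : ((r0 :: rt).set 0 last) = last :: rt := rfl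
      rw [h1]
      have h2 : ((r0 :: rt) ++ [last]).getD 0 0 = r0 := rfl
      rw [h2]
      have h3 : ((r0 :: rt) ++ [last]).erase r0 = rt ++ [last] := by
        simp only [List.cons_append, List.erase_cons_head]
      rw [h3]
      exact (List.perm_append_singleton last rt).symm
    · intro j hj hjl hjp hpp
      simp only [List.length_set, List.length_cons] at hjl
      rw [getD_set_ne (by omega : (0:Nat) ≠ j), getD_set_ne (by omega : (0:Nat) ≠ (j-1)/2)]
      have hjh : j < ((r0 :: rt) ++ [last]).length := by simp; omega
      have e1 : (r0 :: rt).getD j 0 = ((r0 :: rt) ++ [last]).getD j 0 :=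
        (getD_append_left (by simp; omega)).symm
      have e2 : (r0 :: rt).getD ((j-1)/2) 0 = ((r0 :: rt) ++ [last]).getD ((j-1)/2) 0 :=
        (getD_append_left (by simp; omega)).symm
      rw [e1, e2]
      exact hp j hj hjh
    · intro hq
      omega

-- the single loop step of each port
def stepA (st : Int × List Int) (job : List Int) : Int × List Int :=
  let duration := job.getD 0 0
  let deadline := job.getD 1 0
  let time := st.1 + duration
  let heap := hpPush st.2 (-duration)
  if deadline < time then
    let p := hpPop heap
    (time - (- p.1), p.2)
  else (time, heap)

def stepB (st : Int × List Int) (job : List Int) : Int × List Int :=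
  let duration := job.getD 0 0
  let deadline := job.getD 1 0
  let durations := st.2 ++ [duration]
  let time := st.1 + duration
  if deadline < time then
    let longest := (PySem.List.max? durations (fun y => y)).getD 0
    (time - longest, (PySem.List.remove? durations longest).getD durations)
  else (time, durations)

def PInv (a b : Int × List Int) : Prop :=
  a.1 = b.1 ∧ a.2.Perm (b.2.map (fun d => -d)) ∧ HeapProp a.2

theorem getD_zero_mem (l : List Int) (hne : l ≠ []) : l.getD 0 0 ∈ l := by
  cases l with
  | nil => exact absurd rfl hne
  | cons x t => exact List.mem_cons_self

theorem heapProp_getD_zero_le (h : List Int) (hp : HeapProp h) :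
    ∀ y ∈ h, h.getD 0 0 ≤ y := by
  intro y hy
  obtain ⟨i, hi, rfl⟩ := List.mem_iff_getElem.mp hy
  rw [← List.getD_eq_getElem h 0 hi]
  exact heapProp_root_le h hp i hi

theorem step_inv (a b : Int × List Int) (job : List Int) (h : PInv a b) :
    PInv (stepA a job) (stepB b job) := by
  obtain ⟨ht, hperm, hheap⟩ := h
  simp only [stepA, stepB]
  rw [← ht]
  obtain ⟨hp1, hp2⟩ := hpPush_spec a.2 (-(job.getD 0 0)) hheap
  have hperm' : (hpPush a.2 (-(job.getD 0 0))).Perm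
      ((b.2 ++ [job.getD 0 0]).map (fun d => -d)) := by
    refine hp2.trans ?_
    rw [List.map_append]
    exact (hperm.cons _).trans (List.perm_append_singleton _ _).symm
  by_cases hc : job.getD 1 0 < a.1 + job.getD 0 0
  · rw [if_pos hc, if_pos hc]
    have hdne : b.2 ++ [job.getD 0 0] ≠ [] := by simp
    have hHne : hpPush a.2 (-(job.getD 0 0)) ≠ [] := by
      intro hx
      rw [hx] at hperm'
      have := hperm'.length_eq
      simp at this
    obtain ⟨m, hm⟩ : ∃ m, PySem.List.max? (b.2 ++ [job.getD 0 0]) (fun y => y) = some m := by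
      cases hx : PySem.List.max? (b.2 ++ [job.getD 0 0]) (fun y => y) with
      | none => exact absurd ((PySem.List.max?_eq_none_iff _ _).mp hx) hdne
      | some m => exact ⟨m, rfl⟩
    have hmmem := PySem.List.max?_mem hm
    have hmmax := PySem.List.max?_isMax hm
    obtain ⟨hv, hhp2, hperm2⟩ := hpPop_spec _ hp1 hHne
    -- the popped root equals -m
    have hvm0 : (hpPush a.2 (-(job.getD 0 0))).getD 0 0 = -m := by
      have hmem : -m ∈ hpPush a.2 (-(job.getD 0 0)) :=
        hperm'.symm.subset (List.mem_map_of_mem hmmem)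
      have h1 : (hpPush a.2 (-(job.getD 0 0))).getD 0 0 ≤ -m :=
        heapProp_getD_zero_le _ hp1 _ hmem
      have hroot : (hpPush a.2 (-(job.getD 0 0))).getD 0 0 ∈
          (b.2 ++ [job.getD 0 0]).map (fun d => -d) :=
        hperm'.subset (getD_zero_mem _ hHne)
      obtain ⟨y, hy, hyeq⟩ := List.mem_map.mp hroot
      have h2 : y ≤ m := hmmax y hy
      omega
    have hvm : (hpPop (hpPush a.2 (-(job.getD 0 0)))).1 = -m := hv.trans hvm0
    rw [hm]
    simp only [Option.getD_some]
    rw [PySem.List.remove?_eq_some_erase _ m hmmem]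
    simp only [Option.getD_some]
    refine ⟨?_, ?_, hhp2⟩
    · dsimp only
      rw [hvm]
      ring
    · dsimp only
      refine hperm2.trans ?_
      rw [hvm0]
      refine (hperm'.erase _).trans ?_
      rw [List.map_erase (fun x y hxy => neg_injective hxy)]
  · rw [if_neg hc, if_neg hc]
    exact ⟨rfl, hperm', hp1⟩

theorem foldl_inv (s : List (List Int)) (a b : Int × List Int) (h : PInv a b) :
    PInv (s.foldl stepA a) (s.foldl stepB b) := by
  induction s generalizing a b with
  | nil => exact h
  | cons x t ih => exact ih _ _ (step_inv a b x h)

theorem max_jobs_eq (jobs : List (List Int)) :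
    max_jobs jobs =
      (((PySem.List.sorted jobs (fun x => x.getD 1 0)).foldl stepA (0, [])).2.length : Int) := rfl

theorem max_jobs_alt_eq (jobs : List (List Int)) :
    max_jobs_alt jobs =
      (((PySem.List.sorted jobs (fun x => x.getD 1 0)).foldl stepB (0, [])).2.length : Int) := rfl

-- ===== VERDICT (by name: the statement is the Claim_ definition above) =====
theorem max_jobs_spec : Claim_equal_max_jobs := by
  intro jobs _ _
  unfold Spec_max_jobs
  rw [max_jobs_eq, max_jobs_alt_eq]
  have h := foldl_inv (PySem.List.sorted jobs (fun x => x.getD 1 0)) (0, []) (0, [])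
    ⟨rfl, by simp, by intro j hj hlen; simp at hlen⟩
  have hlen := h.2.1.length_eq
  simp only [List.length_map] at hlen
  exact_mod_cast hlen
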